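-- pv_equiv track=rewrite | github.com/msai-amin/perseus-obj4-ai-readiness | current_rqs/rq8/rq8_program_level_technology_correlation.py | classify_program_type
-- ===== SOURCE A (Python) =====
-- def classify_program_type(program_name):
--     """Classify program by type (Forestry, Natural Resources, etc.)"""
--     if not program_name:
--         return 'Other'
--
--     program_lower = str(program_name).lower()
--
--     # Forestry programs
--     if any(term in program_lower for term in [
--         'forestry', 'forest', 'silviculture'
--     ]):
--         return 'Forestry'
--
--     # Natural Resources programs
--     elif any(term in program_lower for term in [
--         'natural resource', 'environmental', 'ecology', 'conservation'
--     ]):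
--         return 'Natural Resources'
--
--     # Geospatial programs
--     elif any(term in program_lower for term in [
--         'gis', 'geospatial', 'geographic', 'spatial'
--     ]):
--         return 'Geospatial'
--
--     # Data Science programs
--     elif any(term in program_lower for term in [
--         'data science', 'analytics', 'informatics', 'computational'
--     ]):
--         return 'Data Science'
--
--     # Engineering programs
--     elif any(term in program_lower for term in [
--         'engineering', 'technology', 'technical'
--     ]):
--         return 'Engineering'
--
--     # Business/Management programs
--     elif any(term in program_lower for term in [
--         'business', 'management', 'administration', 'policy'
--     ]):
--         return 'Business/Management'
--
--     # Science programs
--     elif any(term in program_lower for term in [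
--         'science', 'scientific', 'research'
--     ]):
--         return 'Science'
--
--     # Computer Science programs
--     elif any(term in program_lower for term in [
--         'computer science', 'computing', 'software', 'programming'
--     ]):
--         return 'Computer Science'
--
--     else:
--         return 'Other'
-- ===== SOURCE B (Python) =====
-- # B: position-driven scan with a first-character hash index — at each position of the
-- # lowered text, only the terms bucketed under that character are prefix-tested, and the
-- # minimum tier index is accumulated; no substring search, no branch chain.
-- _TERMS = [
--     ('forestry', 0), ('forest', 0), ('silviculture', 0),
--     ('natural resource', 1), ('environmental', 1), ('ecology', 1), ('conservation', 1),
--     ('gis', 2), ('geospatial', 2), ('geographic', 2), ('spatial', 2),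
--     ('data science', 3), ('analytics', 3), ('informatics', 3), ('computational', 3),
--     ('engineering', 4), ('technology', 4), ('technical', 4),
--     ('business', 5), ('management', 5), ('administration', 5), ('policy', 5),
--     ('science', 6), ('scientific', 6), ('research', 6),
--     ('computer science', 7), ('computing', 7), ('software', 7), ('programming', 7),
-- ]
-- _CATS = ['Forestry', 'Natural Resources', 'Geospatial', 'Data Science',
--          'Engineering', 'Business/Management', 'Science', 'Computer Science', 'Other']
-- _INDEX = {}
-- for _tp in _TERMS:
--     _INDEX.setdefault(_tp[0][0], []).append(_tp)
--
-- def classify_program_type(program_name):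
--     if not program_name:
--         return 'Other'
--     s = str(program_name).lower()
--     best = 8
--     for i in range(len(s)):
--         for term, pri in _INDEX.get(s[i], []):
--             if s.startswith(term, i):
--                 best = min(best, pri)
--     return _CATS[best]
-- ===== Notes on version B (the rewrite author's own statement) =====
-- stated objective: alternative
-- what changed: Replaced A's eight-branch elif chain of substring searches (any(term in s)) by a single position-driven scan: walk every suffix of the lowered text, prefix-match all 29 terms there, and accumulate the minimum tier index, finally indexing a category array.
import Mathlib
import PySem

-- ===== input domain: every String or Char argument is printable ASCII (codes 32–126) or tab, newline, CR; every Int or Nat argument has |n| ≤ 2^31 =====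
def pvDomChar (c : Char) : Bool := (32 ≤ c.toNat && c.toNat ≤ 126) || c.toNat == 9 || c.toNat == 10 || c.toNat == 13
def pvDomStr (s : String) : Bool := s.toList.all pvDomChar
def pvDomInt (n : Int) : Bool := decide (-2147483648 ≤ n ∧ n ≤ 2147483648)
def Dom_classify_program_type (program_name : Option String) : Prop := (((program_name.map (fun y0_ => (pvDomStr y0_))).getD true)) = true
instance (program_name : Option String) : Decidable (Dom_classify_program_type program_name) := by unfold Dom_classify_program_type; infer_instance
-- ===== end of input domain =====

-- B replaces A's eight-branch elif chain of substring searches by one position-driven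
-- scan over the suffixes of the lowered text, prefix-matching a flat term table and
-- accumulating the minimum tier index (objective: alternative algorithm, same cost).

-- ===== PORT A =====
def classify_program_type (program_name : Option String) : String :=
  match program_name with
  | none => "Other"
  | some s =>
    if s = "" then "Other"
    else
      let program_lower := PySem.Str.lower s
      if ["forestry", "forest", "silviculture"].any
          (fun term => PySem.Str.isIn term program_lower) then "Forestry"
      else if ["natural resource", "environmental", "ecology", "conservation"].any
          (fun term => PySem.Str.isIn term program_lower) then "Natural Resources"
      else if ["gis", "geospatial", "geographic", "spatial"].any
          (fun term => PySem.Str.isIn term program_lower) then "Geospatial"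
      else if ["data science", "analytics", "informatics", "computational"].any
          (fun term => PySem.Str.isIn term program_lower) then "Data Science"
      else if ["engineering", "technology", "technical"].any
          (fun term => PySem.Str.isIn term program_lower) then "Engineering"
      else if ["business", "management", "administration", "policy"].any
          (fun term => PySem.Str.isIn term program_lower) then "Business/Management"
      else if ["science", "scientific", "research"].any
          (fun term => PySem.Str.isIn term program_lower) then "Science"
      else if ["computer science", "computing", "software", "programming"].any
          (fun term => PySem.Str.isIn term program_lower) then "Computer Science"
      else "Other"

-- ===== PORT B =====
def pvTerms : List (String × Nat) :=
  [("forestry", 0), ("forest", 0), ("silviculture", 0),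
   ("natural resource", 1), ("environmental", 1), ("ecology", 1), ("conservation", 1),
   ("gis", 2), ("geospatial", 2), ("geographic", 2), ("spatial", 2),
   ("data science", 3), ("analytics", 3), ("informatics", 3), ("computational", 3),
   ("engineering", 4), ("technology", 4), ("technical", 4),
   ("business", 5), ("management", 5), ("administration", 5), ("policy", 5),
   ("science", 6), ("scientific", 6), ("research", 6),
   ("computer science", 7), ("computing", 7), ("software", 7), ("programming", 7)]

def pvCats : List String :=
  ["Forestry", "Natural Resources", "Geospatial", "Data Science",
   "Engineering", "Business/Management", "Science", "Computer Science", "Other"]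

-- _tp[0][0]: first character of the term; every term in _TERMS is nonempty, so headD is exact
def pvKey (tp : String × Nat) : Char := tp.1.toList.headD ' '

-- _INDEX = {}; for _tp in _TERMS: _INDEX.setdefault(_tp[0][0], []).append(_tp)
def pvIndex : PySem.Dict Char (List (String × Nat)) :=
  pvTerms.foldl (fun d tp => d.modify (pvKey tp) [] (· ++ [tp])) PySem.Dict.empty

-- `if s.startswith(term, i): best = min(best, pri)`, with tail = s[i:]:
-- s.startswith(term, i) for the 0 ≤ i produced by range(len(s)) is s[i:].startswith(term)
def pvUpd (tail : List Char) (b : Nat) (tp : String × Nat) : Nat :=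
  if PySem.Chars.startswith tail tp.1.toList then min b tp.2 else b

-- the body of `for i in range(len(s))`: `for term, pri in _INDEX.get(s[i], []): …`
-- s[i] is in range for i in range(len(s)), so pyGetD with an unused default is exact there
def pvBucketStep (l : List Char) (best : Nat) (i : Int) : Nat :=
  (pvIndex.getD (PySem.List.pyGetD l i ' ') []).foldl (pvUpd (l.drop i.toNat)) best

-- _CATS[best]: best is always ≤ 8 = len(_CATS)-1, so Python's indexing never raises; getD is exact here
def classify_program_type_alt (program_name : Option String) : String :=
  match program_name with
  | none => "Other"
  | some s =>
    if s = "" then "Other"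
    else
      let l := (PySem.Str.lower s).toList
      pvCats.getD
        ((PySem.List.pyRange 0 (PySem.Str.len (PySem.Str.lower s)) 1).foldl
          (pvBucketStep l) 8) "Other"

-- ===== PRECONDITION & SPEC =====
def Spec_classify_program_type (program_name : Option String) (out : String) : Prop := out = classify_program_type_alt program_name
instance (program_name : Option String) (out : String) : Decidable (Spec_classify_program_type program_name out) := by unfold Spec_classify_program_type; infer_instance

-- ===== CLAIM (what is proved, stated in full; the proofs are below) =====
def Claim_equal_classify_program_type : Prop := ∀ (program_name : Option String), Dom_classify_program_type program_name → Spec_classify_program_type program_name (classify_program_type program_name)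

-- ===== LEMMAS AND PROOFS =====

-- the inner loop's effect with the WHOLE term table (what bucketing will be reduced to)
def pvInner (tail : List Char) (best : Nat) : Nat :=
  pvTerms.foldl (pvUpd tail) best

-- suffix-recursion form of the whole scan
def pvScan : List Char → Nat → Nat
  | [], best => best
  | c :: rest, best => pvScan rest (pvInner (c :: rest) best)

-- the `isIn`-driven fold the scan is shown to compute
def pvIsInFold (l : List Char) (b : Nat) : Nat :=
  pvTerms.foldl (fun b tp => if PySem.Chars.isIn tp.1.toList l then min b tp.2 else b) b

theorem pv_fold_false (c : String × Nat → Bool) (xs : List (String × Nat))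
    (h : ∀ tp ∈ xs, c tp = false) :
    ∀ b, xs.foldl (fun b tp => if c tp then min b tp.2 else b) b = b := by
  induction xs with
  | nil => intro b; rfl
  | cons x xs ih =>
    intro b
    have hx : c x = false := h x (List.mem_cons_self)
    simp only [List.foldl_cons, hx, if_neg, Bool.false_eq_true, not_false_iff]
    exact ih (fun tp ht => h tp (List.mem_cons_of_mem _ ht)) b

theorem pv_fold_min (c : String × Nat → Bool) (xs : List (String × Nat)) :
    ∀ b k, xs.foldl (fun b tp => if c tp then min b tp.2 else b) (min b k)
      = min (xs.foldl (fun b tp => if c tp then min b tp.2 else b) b) k := by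
  induction xs with
  | nil => intro b k; rfl
  | cons x xs ih =>
    intro b k
    simp only [List.foldl_cons]
    rw [show (if c x then min (min b k) x.2 else min b k)
        = min (if c x then min b x.2 else b) k from by
      cases h : c x
      · simp only [Bool.false_eq_true, if_false]
      · simp only [if_true]
        omega]
    exact ih _ k

theorem pv_fold_or (p q : String × Nat → Bool) (xs : List (String × Nat)) :
    ∀ b, xs.foldl (fun b tp => if p tp || q tp then min b tp.2 else b) b
      = xs.foldl (fun b tp => if q tp then min b tp.2 else b)
          (xs.foldl (fun b tp => if p tp then min b tp.2 else b) b) := by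
  induction xs with
  | nil => intro b; rfl
  | cons x xs ih =>
    intro b
    simp only [List.foldl_cons]
    rw [ih]
    congr 1
    cases hq : q x with
    | false => simp
    | true =>
      cases hp : p x with
      | false =>
        simp only [Bool.false_or, if_true]
        exact pv_fold_min p xs b x.2
      | true =>
        simp only [Bool.true_or, if_true]
        rw [pv_fold_min p xs b x.2]
        omega

theorem pv_isIn_cons (t : List Char) (c : Char) (r : List Char) :
    PySem.Chars.isIn t (c :: r) = (PySem.Chars.startswith (c :: r) t || PySem.Chars.isIn t r) := by
  rw [Bool.eq_iff_iff, Bool.or_eq_true, PySem.Chars.isIn_iff_infix, PySem.Chars.isIn_iff_infix,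
    PySem.Chars.startswith_iff, List.infix_cons_iff]

theorem pv_scan_eq : ∀ (l : List Char) (b : Nat), pvScan l b = pvIsInFold l b := by
  intro l
  induction l with
  | nil =>
    intro b
    exact (pv_fold_false (fun tp => PySem.Chars.isIn tp.1.toList []) pvTerms (by decide) b).symm
  | cons c r ih =>
    intro b
    show pvScan r (pvInner (c :: r) b) = pvIsInFold (c :: r) b
    rw [ih]
    unfold pvIsInFold pvInner
    simp only [pv_isIn_cons]
    exact (pv_fold_or (fun tp => PySem.Chars.startswith (c :: r) tp.1.toList)
      (fun tp => PySem.Chars.isIn tp.1.toList r) pvTerms b).symm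

-- ===== bucket index: iterating one bucket equals iterating the whole table =====
theorem pv_skip (c : Char) (rest : List Char) (tp : String × Nat) (h : tp ∈ pvTerms)
    (hk : (pvKey tp == c) = false) :
    PySem.Chars.startswith (c :: rest) tp.1.toList = false := by
  have hall : ∀ x ∈ pvTerms, x.1.toList ≠ [] := by decide
  have hne : tp.1.toList ≠ [] := hall tp h
  rw [← Bool.not_eq_true, PySem.Chars.startswith_iff]
  intro hpre
  cases ht : tp.1.toList with
  | nil => exact hne ht
  | cons a t' =>
    rw [ht] at hpre
    rcases (List.cons_prefix_cons.mp hpre) with ⟨rfl, -⟩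
    apply Bool.eq_false_iff.mp hk
    simp [pvKey, ht]

theorem pv_fold_filter {α β : Type} (p : α → Bool) (upd : β → α → β) (xs : List α)
    (h : ∀ x ∈ xs, p x = false → ∀ b, upd b x = b) :
    ∀ b, (xs.filter p).foldl upd b = xs.foldl upd b := by
  induction xs with
  | nil => intro b; rfl
  | cons x xs ih =>
    intro b
    have ih' := ih (fun y hy => h y (List.mem_cons_of_mem _ hy))
    cases hx : p x with
    | true => simp only [List.filter_cons, hx, if_true, List.foldl_cons]; exact ih' _
    | false =>
      simp only [List.filter_cons, hx, Bool.false_eq_true, if_false, List.foldl_cons,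
        h x List.mem_cons_self hx b]
      exact ih' b

theorem pv_getD_modify (xs : List (String × Nat)) :
    ∀ (d : PySem.Dict Char (List (String × Nat))) (c : Char),
    (xs.foldl (fun d tp => d.modify (pvKey tp) [] (· ++ [tp])) d).getD c []
      = d.getD c [] ++ xs.filter (fun tp => pvKey tp == c) := by
  induction xs with
  | nil => intro d c; simp
  | cons x xs ih =>
    intro d c
    simp only [List.foldl_cons, List.filter_cons]
    rw [ih]
    rcases eq_or_ne c (pvKey x) with hc | hc
    · subst hc
      rw [PySem.Dict.getD_modify]
      simp [List.append_assoc]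
    · rw [PySem.Dict.getD_modify, if_neg hc]
      have : (pvKey x == c) = false := by
        simpa [beq_iff_eq] using fun h => hc h.symm
      simp [this]

theorem pv_bucket (c : Char) :
    pvIndex.getD c [] = pvTerms.filter (fun tp => pvKey tp == c) := by
  unfold pvIndex
  rw [pv_getD_modify]
  simp [PySem.Dict.getD_empty]

theorem pv_bucket_inner (c : Char) (rest : List Char) (b : Nat) :
    (pvIndex.getD c []).foldl (pvUpd (c :: rest)) b = pvInner (c :: rest) b := by
  rw [pv_bucket]
  exact pv_fold_filter _ (pvUpd (c :: rest)) pvTerms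
    (fun tp h hk b => by unfold pvUpd; rw [pv_skip c rest tp h hk]; rfl) b

-- the index-driven loop over range(len(l)) is the suffix scan
theorem pv_range_scan : ∀ (l : List Char) (b : Nat),
    (List.range l.length).foldl
      (fun best k => (pvIndex.getD (l.getD k ' ') []).foldl (pvUpd (l.drop k)) best) b
      = pvScan l b := by
  intro l
  induction l with
  | nil => intro b; rfl
  | cons c r ih =>
    intro b
    rw [List.length_cons, List.range_succ_eq_map, List.foldl_cons, List.foldl_map]
    simp only [List.getD_cons_succ, List.getD_cons_zero, List.drop_succ_cons, List.drop_zero]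
    rw [show pvScan (c :: r) b = pvScan r (pvInner (c :: r) b) from rfl,
      ← pv_bucket_inner c r b]
    exact ih _

-- ===== tiers: the isIn fold, tier by tier =====
-- one tier's effect on the running minimum, as a function (keeps rewritten terms linear)
def pvStep (c : Bool) (k b : Nat) : Nat := if c then min b k else b

theorem pv_fold_const (l : List Char) (xs : List (String × Nat)) (k : Nat)
    (h : ∀ tp ∈ xs, tp.2 = k) :
    ∀ b, xs.foldl (fun b tp => if PySem.Chars.isIn tp.1.toList l then min b tp.2 else b) b
      = pvStep (xs.any (fun tp => PySem.Chars.isIn tp.1.toList l)) k b := by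
  unfold pvStep
  induction xs with
  | nil => intro b; simp
  | cons x xs ih =>
    intro b
    have hx : x.2 = k := h x List.mem_cons_self
    have ih' := ih (fun tp ht => h tp (List.mem_cons_of_mem _ ht))
    simp only [List.foldl_cons, List.any_cons]
    rcases Bool.eq_false_or_eq_true (PySem.Chars.isIn x.1.toList l) with hc | hc
    · simp only [hc, if_true, Bool.true_or]
      rw [ih' (min b x.2), hx]
      split_ifs <;> omega
    · simp only [hc, Bool.false_eq_true, if_false, Bool.false_or]
      exact ih' b

theorem pv_steps (c0 c1 c2 c3 c4 c5 c6 c7 : Bool) :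
    pvCats.getD (pvStep c7 7 (pvStep c6 6 (pvStep c5 5 (pvStep c4 4 (pvStep c3 3
        (pvStep c2 2 (pvStep c1 1 (pvStep c0 0 8)))))))) "Other"
      = if c0 then "Forestry"
        else if c1 then "Natural Resources"
        else if c2 then "Geospatial"
        else if c3 then "Data Science"
        else if c4 then "Engineering"
        else if c5 then "Business/Management"
        else if c6 then "Science"
        else if c7 then "Computer Science"
        else "Other" := by
  revert c0 c1 c2 c3 c4 c5 c6 c7
  decide

-- the term table, tier by tier (used only to regroup the fold in the proof)
def pvSeg0 : List (String × Nat) := [("forestry", 0), ("forest", 0), ("silviculture", 0)]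
def pvSeg1 : List (String × Nat) := [("natural resource", 1), ("environmental", 1), ("ecology", 1), ("conservation", 1)]
def pvSeg2 : List (String × Nat) := [("gis", 2), ("geospatial", 2), ("geographic", 2), ("spatial", 2)]
def pvSeg3 : List (String × Nat) := [("data science", 3), ("analytics", 3), ("informatics", 3), ("computational", 3)]
def pvSeg4 : List (String × Nat) := [("engineering", 4), ("technology", 4), ("technical", 4)]
def pvSeg5 : List (String × Nat) := [("business", 5), ("management", 5), ("administration", 5), ("policy", 5)]
def pvSeg6 : List (String × Nat) := [("science", 6), ("scientific", 6), ("research", 6)]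
def pvSeg7 : List (String × Nat) := [("computer science", 7), ("computing", 7), ("software", 7), ("programming", 7)]

theorem pvTerms_eq :
    pvTerms = pvSeg0 ++ pvSeg1 ++ pvSeg2 ++ pvSeg3 ++ pvSeg4 ++ pvSeg5 ++ pvSeg6 ++ pvSeg7 := rfl

theorem pv_foldl_range_cast (l : List Char) (b : Nat) :
    (PySem.List.pyRange 0 (l.length : Int) 1).foldl (pvBucketStep l) b
      = (List.range l.length).foldl
          (fun best k => (pvIndex.getD (l.getD k ' ') []).foldl (pvUpd (l.drop k)) best) b := by
  rw [PySem.List.pyRange_one, List.foldl_map]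
  simp only [Int.sub_zero, Int.toNat_natCast, zero_add, pvBucketStep,
    PySem.List.pyGetD_natCast]

-- ===== VERDICT (by name: the statement is the Claim_ definition above) =====
set_option maxHeartbeats 2000000 in
theorem classify_program_type_spec : Claim_equal_classify_program_type := by
  intro pn _
  unfold Spec_classify_program_type
  cases pn with
  | none => rfl
  | some s =>
    rcases eq_or_ne s "" with hs | hs
    · subst hs; rfl
    · simp only [classify_program_type, classify_program_type_alt, if_neg hs]
      rw [PySem.Str.len_eq, pv_foldl_range_cast, pv_range_scan, pv_scan_eq]
      unfold pvIsInFold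
      rw [pvTerms_eq]
      simp only [List.foldl_append]
      rw [pv_fold_const _ pvSeg0 0 (by decide), pv_fold_const _ pvSeg1 1 (by decide),
          pv_fold_const _ pvSeg2 2 (by decide), pv_fold_const _ pvSeg3 3 (by decide),
          pv_fold_const _ pvSeg4 4 (by decide), pv_fold_const _ pvSeg5 5 (by decide),
          pv_fold_const _ pvSeg6 6 (by decide), pv_fold_const _ pvSeg7 7 (by decide)]
      simp only [pvSeg0, pvSeg1, pvSeg2, pvSeg3, pvSeg4, pvSeg5, pvSeg6, pvSeg7,
        List.any_cons, List.any_nil, Bool.or_false]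
      rw [pv_steps]
      simp only [PySem.Str.isIn_eq]
      rfl
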